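-- pv_equiv track=rewrite | github.com/bphillab/Five_Thirty_Eight_Riddler | Riddler_20_02_07/Riddler_Classic_20_02_07.py | create_exec_str
-- ===== SOURCE A (Python) =====
-- def create_exec_str(arr, prev_str='', depth=0):
--     if not arr:
--         return [prev_str[1:] + ')']
--     if depth == 0:
--         return create_exec_str(arr[1:], prev_str + '*abs(-' + str(arr[0]), depth + 1)
--     if depth > len(arr):
--         return create_exec_str(arr[1:], prev_str + ') -' + str(arr[0]), depth - 1)
--     return create_exec_str(arr[1:], prev_str + '*abs(-' + str(arr[0]), depth + 1) + \
--            create_exec_str(arr[1:], prev_str + ') -' + str(arr[0]), depth - 1)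
-- ===== SOURCE B (Python) =====
-- def create_exec_str(arr, prev_str='', depth=0):
--     results = []
--     stack = [(list(arr), prev_str, depth)]
--     while stack:
--         a, p, d = stack.pop()
--         if not a:
--             results.append(p[1:] + ')')
--             continue
--         rest = a[1:]
--         open_succ = (rest, p + '*abs(-' + str(a[0]), d + 1)
--         close_succ = (rest, p + ') -' + str(a[0]), d - 1)
--         if d == 0:
--             stack.append(open_succ)
--         elif d > len(a):
--             stack.append(close_succ)
--         else:
--             stack.append(close_succ)
--             stack.append(open_succ)
--     return results
-- ===== Notes on version B (the rewrite author's own statement) =====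
-- stated objective: alternative
-- what changed: Replaces the branching recursion by an explicit LIFO stack of pending states with a results accumulator, pushing the close-branch state before the open-branch state so the output order matches A.
import Mathlib
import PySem

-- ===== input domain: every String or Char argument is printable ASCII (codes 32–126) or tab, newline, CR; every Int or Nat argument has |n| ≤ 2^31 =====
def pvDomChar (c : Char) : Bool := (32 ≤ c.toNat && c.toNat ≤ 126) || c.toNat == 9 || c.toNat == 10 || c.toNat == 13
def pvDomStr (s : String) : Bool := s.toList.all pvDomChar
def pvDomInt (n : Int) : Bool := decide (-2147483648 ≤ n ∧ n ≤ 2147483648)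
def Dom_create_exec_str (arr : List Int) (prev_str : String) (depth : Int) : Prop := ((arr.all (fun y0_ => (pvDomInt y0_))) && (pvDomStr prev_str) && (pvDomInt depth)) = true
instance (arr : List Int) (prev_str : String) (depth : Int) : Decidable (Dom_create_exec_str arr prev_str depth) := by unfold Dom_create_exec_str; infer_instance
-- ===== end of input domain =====

-- B replaces A's branching recursion by an explicit LIFO stack of pending states with a
-- results accumulator (objective: alternative decomposition, same cost).

-- ===== PORT A =====
-- literal transliteration of A's branching recursion
def create_exec_str : List Int → String → Int → List String
  | [], prev_str, _ =>
      [PySem.Str.slice prev_str (some 1) none ++ ")"]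
  | x :: rest, prev_str, depth =>
      if depth = 0 then
        create_exec_str rest (prev_str ++ "*abs(-" ++ PySem.Int.toStr x) (depth + 1)
      else if depth > (((x :: rest : List Int).length : Int)) then
        create_exec_str rest (prev_str ++ ") -" ++ PySem.Int.toStr x) (depth - 1)
      else
        create_exec_str rest (prev_str ++ "*abs(-" ++ PySem.Int.toStr x) (depth + 1) ++
        create_exec_str rest (prev_str ++ ") -" ++ PySem.Int.toStr x) (depth - 1)

-- ===== PORT B =====
-- the stack's total weight; each pop strictly decreases it (termination measure)
def pvStackMeasure (st : List (List Int × String × Int)) : Nat :=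
  (st.map (fun s => 3 ^ s.1.length)).sum

-- the while-loop of Source B: head of the list = top of the Python stack
def pvRunStack (st : List (List Int × String × Int)) (res : List String) : List String :=
  match st with
  | [] => res
  | (a, p, d) :: tl =>
    match a with
    | [] => pvRunStack tl (res ++ [PySem.Str.slice p (some 1) none ++ ")"])
    | x :: rest =>
      if d = 0 then
        pvRunStack ((rest, p ++ "*abs(-" ++ PySem.Int.toStr x, d + 1) :: tl) res
      else if d > (((x :: rest : List Int).length : Int)) then
        pvRunStack ((rest, p ++ ") -" ++ PySem.Int.toStr x, d - 1) :: tl) res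
      else
        pvRunStack ((rest, p ++ "*abs(-" ++ PySem.Int.toStr x, d + 1) ::
                    (rest, p ++ ") -" ++ PySem.Int.toStr x, d - 1) :: tl) res
  termination_by pvStackMeasure st
  decreasing_by
  · simp [pvStackMeasure]
  · simp only [pvStackMeasure, List.map_cons, List.sum_cons, List.length_cons]
    have h : 3 ^ rest.length < 3 ^ (rest.length + 1) :=
      Nat.pow_lt_pow_succ (by norm_num)
    omega
  · simp only [pvStackMeasure, List.map_cons, List.sum_cons, List.length_cons]
    have h : 3 ^ rest.length < 3 ^ (rest.length + 1) :=
      Nat.pow_lt_pow_succ (by norm_num)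
    omega
  · simp only [pvStackMeasure, List.map_cons, List.sum_cons, List.length_cons]
    have h : 3 ^ rest.length < 3 ^ (rest.length + 1) :=
      Nat.pow_lt_pow_succ (by norm_num)
    omega

def create_exec_str_alt (arr : List Int) (prev_str : String) (depth : Int) : List String :=
  pvRunStack [(arr, prev_str, depth)] []

-- ===== PRECONDITION & SPEC =====
def Spec_create_exec_str (arr : List Int) (prev_str : String) (depth : Int) (out : List String) : Prop := out = create_exec_str_alt arr prev_str depth
instance (arr : List Int) (prev_str : String) (depth : Int) (out : List String) : Decidable (Spec_create_exec_str arr prev_str depth out) := by unfold Spec_create_exec_str; infer_instance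

-- ===== CLAIM (what is proved, stated in full; the proofs are below) =====
def Claim_equal_create_exec_str : Prop := ∀ (arr : List Int) (prev_str : String) (depth : Int), Dom_create_exec_str arr prev_str depth → Spec_create_exec_str arr prev_str depth (create_exec_str arr prev_str depth)

-- ===== LEMMAS AND PROOFS =====
-- invariant of the stack machine: popping one state emits exactly A's result for it
theorem pvRunStack_cons (a : List Int) :
    ∀ (p : String) (d : Int) (st : List (List Int × String × Int)) (res : List String),
      pvRunStack ((a, p, d) :: st) res = pvRunStack st (res ++ create_exec_str a p d) := by
  induction a with
  | nil =>
    intro p d st res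
    simp [pvRunStack, create_exec_str]
  | cons x rest ih =>
    intro p d st res
    rw [pvRunStack]
    split_ifs with h0 h1
    · rw [ih]
      rw [create_exec_str]
      simp [h0]
    · rw [ih]
      rw [create_exec_str]
      simp [h0, show ((rest.length : Int) + 1 < d) by simpa using h1]
    · rw [ih, ih]
      rw [create_exec_str]
      simp [h0, show ¬((rest.length : Int) + 1 < d) by simpa using h1, List.append_assoc]

-- ===== VERDICT (by name: the statement is the Claim_ definition above) =====
theorem create_exec_str_spec : Claim_equal_create_exec_str := by
  intro arr prev_str depth _
  unfold Spec_create_exec_str create_exec_str_alt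
  rw [pvRunStack_cons]
  simp [pvRunStack]
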